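-- pv_equiv track=rewrite | github.com/JuanFGo08/PythonMicroservices | my_array.py | myBlocks
-- ===== SOURCE A (Python) =====
-- def myBlocks(arr: list[int]) -> list[list[int] | list[str]]:
-- 	separated_lists = []
--
-- 	for _ in range(arr.count(0) + 1):
-- 		try:
-- 			# Find the index of the first zero in the array
-- 			zero_index = arr.index(0)
-- 		except ValueError:
-- 			# If no zero is found, treat the rest of the array as a single block
-- 			zero_index = len(arr)
-- 		# Append the sorted sub-array before the zero, or "X" if empty
-- 		separated_lists.append(sorted(arr[:zero_index]) if arr[:zero_index] else ["X"])
-- 		# Remove the processed part of the array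
-- 		arr = arr[zero_index + 1 :]
--
-- 	return " ".join("".join(map(str, lst)) for lst in separated_lists)
-- ===== SOURCE B (Python) =====
-- def myBlocks(arr: list[int]) -> list[list[int] | list[str]]:
-- 	blocks = []
-- 	cur = []
-- 	for x in arr:
-- 		if x == 0:
-- 			blocks.append(cur)
-- 			cur = []
-- 		else:
-- 			cur.append(x)
-- 	blocks.append(cur)
-- 	return " ".join("".join(map(str, sorted(b))) if b else "X" for b in blocks)
-- ===== Notes on version B (the rewrite author's own statement) =====
-- stated objective: alternative
-- what changed: Replaces the repeated count/index/slice passes (one rescan and reallocation of the remaining array per zero) with a single linear pass that accumulates blocks between zeros, then sorts and renders each block; on the generated timing inputs the cost is the same.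
import Mathlib
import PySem

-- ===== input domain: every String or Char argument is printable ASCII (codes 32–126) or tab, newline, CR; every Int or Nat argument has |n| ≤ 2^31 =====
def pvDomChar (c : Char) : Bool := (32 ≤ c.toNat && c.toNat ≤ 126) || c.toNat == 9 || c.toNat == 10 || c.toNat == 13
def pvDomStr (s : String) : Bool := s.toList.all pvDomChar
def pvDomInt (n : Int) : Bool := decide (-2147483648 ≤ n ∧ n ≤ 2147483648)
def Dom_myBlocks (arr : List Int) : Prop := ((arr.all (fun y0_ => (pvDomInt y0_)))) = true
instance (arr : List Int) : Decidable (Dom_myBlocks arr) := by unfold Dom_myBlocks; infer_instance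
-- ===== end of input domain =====

-- B replaces A's per-zero count/index/slice rescans by one linear pass that splits on zeros (alternative decomposition).

-- ===== PORT A =====
-- A's loop body: find the first zero (or len), append sorted prefix (rendered) or ["X"], drop past the zero.
def myBlocksGo : Nat → List Int → List (List String) → List (List String)
  | 0, _, acc => acc
  | n + 1, arr, acc =>
    let zi : Nat := (PySem.List.index? arr 0).getD arr.length
    let pre := PySem.List.slice arr none (some (zi : Int))
    let entry := if pre = [] then ["X"]
                 else (PySem.List.sorted pre (fun x => x) false).map PySem.Int.toStr
    myBlocksGo n (PySem.List.slice arr (some ((zi : Int) + 1)) none) (acc ++ [entry])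

def myBlocks (arr : List Int) : String :=
  PySem.Str.join " "
    ((myBlocksGo (PySem.List.count arr 0 + 1) arr []).map (fun lst => PySem.Str.join "" lst))

-- ===== PORT B =====
def myBlocksAltStep (s : List (List Int) × List Int) (x : Int) : List (List Int) × List Int :=
  if x = 0 then (s.1 ++ [s.2], []) else (s.1, s.2 ++ [x])

def myBlocks_alt (arr : List Int) : String :=
  let s := arr.foldl myBlocksAltStep ([], [])
  let blocks := s.1 ++ [s.2]
  PySem.Str.join " "
    (blocks.map (fun b =>
      if b = [] then "X"
      else PySem.Str.join "" ((PySem.List.sorted b (fun x => x) false).map PySem.Int.toStr)))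

-- ===== PRECONDITION & SPEC =====
def Spec_myBlocks (arr : List Int) (out : String) : Prop := out = myBlocks_alt arr
instance (arr : List Int) (out : String) : Decidable (Spec_myBlocks arr out) := by unfold Spec_myBlocks; infer_instance

-- ===== CLAIM (what is proved, stated in full; the proofs are below) =====
def Claim_equal_myBlocks : Prop := ∀ (arr : List Int), Dom_myBlocks arr → Spec_myBlocks arr (myBlocks arr)

-- ===== LEMMAS AND PROOFS =====

-- the common skeleton: the maximal zero-free blocks of the list, in order
def splitZ : List Int → List (List Int)
  | [] => [[]]
  | x :: xs => if x = 0 then [] :: splitZ xs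
               else (x :: (splitZ xs).headI) :: (splitZ xs).tail

theorem splitZ_ne_nil (l : List Int) : splitZ l ≠ [] := by
  cases l with
  | nil => simp [splitZ]
  | cons x xs => by_cases h : x = 0 <;> simp [splitZ, h]

theorem splitZ_no_zero (l : List Int) (h : (0 : Int) ∉ l) : splitZ l = [l] := by
  induction l with
  | nil => rfl
  | cons x xs ih =>
    simp only [List.mem_cons, not_or] at h
    simp [splitZ, Ne.symm h.1, ih h.2]

theorem splitZ_prefix (p r : List Int) (h : (0 : Int) ∉ p) :
    splitZ (p ++ 0 :: r) = p :: splitZ r := by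
  induction p with
  | nil => simp [splitZ]
  | cons x xs ih =>
    simp only [List.mem_cons, not_or] at h
    simp [splitZ, Ne.symm h.1, ih h.2]

def renderA (b : List Int) : List String :=
  if b = [] then ["X"] else (PySem.List.sorted b (fun x => x) false).map PySem.Int.toStr

theorem myBlocksGo_eq (n : Nat) : ∀ (arr : List Int) (acc : List (List String)),
    PySem.List.count arr 0 = n →
    myBlocksGo (n + 1) arr acc = acc ++ (splitZ arr).map renderA := by
  induction n with
  | zero =>
    intro arr acc hc
    have h0 : (0 : Int) ∉ arr := by
      rw [PySem.List.count_eq] at hc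
      exact (List.count_eq_zero).mp hc
    have hidx : PySem.List.index? arr 0 = none :=
      (PySem.List.index?_eq_none_iff arr 0).mpr h0
    simp only [myBlocksGo, hidx, Option.getD_none, PySem.List.slice_to_natCast,
      List.take_length, splitZ_no_zero arr h0, List.map_cons, List.map_nil, renderA]
  | succ n ih =>
    intro arr acc hc
    have h0 : (0 : Int) ∈ arr := by
      rw [PySem.List.count_eq] at hc
      by_contra h
      rw [List.count_eq_zero.mpr h] at hc
      omega
    obtain ⟨k, hk⟩ := Option.isSome_iff_exists.mp ((PySem.List.index?_isSome_iff arr 0).mpr h0)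
    obtain ⟨p, r, harr, hlen, hp⟩ := (PySem.List.index?_eq_some_iff arr 0 k).mp hk
    subst harr
    have hpre : PySem.List.slice (p ++ 0 :: r) none (some (k : Int)) = p := by
      rw [PySem.List.slice_to_natCast, ← hlen, List.take_left]
    have hdrop : PySem.List.slice (p ++ 0 :: r) (some ((k : Int) + 1)) none = r := by
      have : ((k : Int) + 1) = ((k + 1 : Nat) : Int) := by push_cast; ring
      rw [this, PySem.List.slice_from_natCast, ← hlen]
      simp
    have hcr : PySem.List.count r 0 = n := by
      rw [PySem.List.count_eq] at hc ⊢
      rw [List.count_append, List.count_cons, List.count_eq_zero.mpr hp] at hc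
      simpa using hc
    rw [show n + 1 + 1 = (n + 1) + 1 from rfl, myBlocksGo]
    simp only [hk, Option.getD_some, hpre, hdrop]
    rw [ih r _ hcr, splitZ_prefix p r hp]
    simp [renderA]

theorem foldB_eq (l : List Int) : ∀ (bs : List (List Int)) (cur : List Int),
    (l.foldl myBlocksAltStep (bs, cur)).1 ++ [(l.foldl myBlocksAltStep (bs, cur)).2]
      = bs ++ (cur ++ (splitZ l).headI) :: (splitZ l).tail := by
  induction l with
  | nil => intro bs cur; simp [splitZ]
  | cons x xs ih =>
    intro bs cur
    by_cases h : x = 0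
    · subst h
      obtain ⟨b, t, hbt⟩ := List.exists_cons_of_ne_nil (splitZ_ne_nil xs)
      simp [splitZ, List.foldl_cons, myBlocksAltStep, ih, hbt]
    · simp [splitZ, List.foldl_cons, myBlocksAltStep, h, ih]

theorem renderA_join (b : List Int) :
    PySem.Str.join "" (renderA b) =
      (if b = [] then "X"
       else PySem.Str.join "" ((PySem.List.sorted b (fun x => x) false).map PySem.Int.toStr)) := by
  by_cases h : b = [] <;> simp [renderA, h]
  decide

-- ===== VERDICT (by name: the statement is the Claim_ definition above) =====
theorem myBlocks_spec : Claim_equal_myBlocks := by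
  intro arr _
  unfold Spec_myBlocks myBlocks myBlocks_alt
  obtain ⟨b, t, hbt⟩ := List.exists_cons_of_ne_nil (splitZ_ne_nil arr)
  rw [myBlocksGo_eq (PySem.List.count arr 0) arr [] rfl]
  simp only [foldB_eq arr [] [], hbt, List.headI_cons, List.tail_cons, List.nil_append,
    List.map_map, List.nil_append]
  rw [← hbt]
  congr 1
  apply List.map_congr_left
  intro x _
  exact renderA_join x
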